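-- pv_equiv track=rewrite | github.com/samuelwford/adventofcode | 2025/day_06.py | part1
-- ===== SOURCE A (Python) =====
-- import functools
-- import operator
--
-- def parse(lines):
--     ops = list(lines[-1].split())
--     nums = [list(map(int, line.split())) for line in lines[:-1]]
--     pivoted = list(map(list, zip(*nums)))
--     return (pivoted, ops)
--
-- def part1(lines):
--     numbers, operators = parse(lines)
--     sum = 0
--     for i in range(len(numbers)):
--         if operators[i] == '+':
--             sum += functools.reduce(operator.add, numbers[i])
--         else:
--             sum += functools.reduce(operator.mul, numbers[i])
--     return sum
-- ===== SOURCE B (Python) =====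
-- def part1(lines):
--     ops = lines[-1].split()
--     data = [[int(t) for t in line.split()] for line in lines[:-1]]
--     ncols = min((len(r) for r in data), default=0)
--     acc = [0 if op == '+' else 1 for op in ops[:ncols]]
--     for row in data:
--         acc = [(a + v) if op == '+' else (a * v)
--                for a, v, op in zip(acc, row, ops)]
--     return sum(acc)
-- ===== Notes on version B (the rewrite author's own statement) =====
-- stated objective: alternative
-- what changed: B drops the transpose: instead of pivoting the grid and reducing each column, it keeps one per-column accumulator (0 for '+', 1 for '*') and folds every data row into it in a single row-major pass, returning the accumulators' sum.
import Mathlib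
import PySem

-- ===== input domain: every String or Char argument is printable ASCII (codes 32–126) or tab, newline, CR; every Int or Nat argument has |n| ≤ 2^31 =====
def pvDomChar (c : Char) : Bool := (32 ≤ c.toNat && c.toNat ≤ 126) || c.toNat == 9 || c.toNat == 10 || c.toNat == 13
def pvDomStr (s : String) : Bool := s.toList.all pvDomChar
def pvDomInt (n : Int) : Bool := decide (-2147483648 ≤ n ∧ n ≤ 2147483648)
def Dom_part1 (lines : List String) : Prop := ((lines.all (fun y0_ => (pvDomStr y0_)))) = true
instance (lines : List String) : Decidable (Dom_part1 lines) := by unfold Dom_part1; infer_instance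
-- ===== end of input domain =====

-- B replaces A's transpose-then-reduce-each-column with a single row-major fold of per-column accumulators (alternative decomposition, same cost).

-- shared tokenization: list(map(int, line.split())) (getD 0 unreachable inside Pre_, where every token parses)
def pvRow (l : String) : List Int := (PySem.Str.split₀ l).map (fun t => (PySem.Int.ofStr? t).getD 0)

-- ===== PORT A =====
-- zip(*rows): exact zip semantics — length = shortest row, column i = the i-th element of each row
def pyZipStar (rows : List (List Int)) : List (List Int) :=
  (List.range (((rows.map List.length).min?).getD 0)).map
    (fun i => rows.map (fun r => r.getD i 0))

-- functools.reduce(operator.add / operator.mul, l); the [] case is unreachable (reduce raises there,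
-- and columns of a nonempty pivoted list are nonempty)
def pvReduceAdd : List Int → Int
  | [] => 0
  | h :: t => t.foldl (· + ·) h
def pvReduceMul : List Int → Int
  | [] => 1
  | h :: t => t.foldl (· * ·) h

def part1 (lines : List String) : Int :=
  let ops := PySem.Str.split₀ ((PySem.List.pyGet? lines (-1)).getD "")
  let nums := (PySem.List.slice lines none (some (-1))).map pvRow
  let pivoted := pyZipStar nums
  (PySem.List.pyRange 0 (pivoted.length : Int) 1).foldl
    (fun s i =>
      if (PySem.List.pyGet? ops i).getD "" = "+" then
        s + pvReduceAdd ((PySem.List.pyGet? pivoted i).getD [])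
      else
        s + pvReduceMul ((PySem.List.pyGet? pivoted i).getD [])) 0

-- ===== PORT B =====
-- the comprehension over zip(acc, row, ops)
def pvCombine : List Int → List Int → List String → List Int
  | a :: as, v :: vs, op :: ops =>
      (if op = "+" then a + v else a * v) :: pvCombine as vs ops
  | _, _, _ => []

def part1_alt (lines : List String) : Int :=
  let ops := PySem.Str.split₀ ((PySem.List.pyGet? lines (-1)).getD "")
  let data := (PySem.List.slice lines none (some (-1))).map pvRow
  let ncols := ((data.map List.length).min?).getD 0
  let init := (PySem.List.slice ops none (some (ncols : Int))).map
      (fun op => if op = "+" then (0 : Int) else 1)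
  (data.foldl (fun acc row => pvCombine acc row ops) init).sum

-- ===== PRECONDITION & SPEC =====
-- Pre_ excludes exactly the inputs on which A raises: the empty list (lines[-1] → IndexError),
-- a data-line token int() rejects (ValueError), and fewer operators than columns (operators[i] → IndexError).
def Pre_part1 (lines : List String) : Prop :=
  lines ≠ [] ∧
  (∀ l ∈ lines.dropLast, ∀ t ∈ PySem.Str.split₀ l, (PySem.Int.ofStr? t).isSome = true) ∧
  (((lines.dropLast.map (fun l => (PySem.Str.split₀ l).length)).min?).getD 0
      ≤ (PySem.Str.split₀ (lines.getLast?.getD "")).length)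
instance (lines : List String) : Decidable (Pre_part1 lines) := by unfold Pre_part1; infer_instance

def pvWitness_part1 : List String := ["1 2", "3 4", "+ *"]

def Spec_part1 (lines : List String) (out : Int) : Prop := out = part1_alt lines
instance (lines : List String) (out : Int) : Decidable (Spec_part1 lines out) := by unfold Spec_part1; infer_instance

-- ===== CLAIM (what is proved, stated in full; the proofs are below) =====
def Claim_equal_part1 : Prop := ∀ (lines : List String), Dom_part1 lines → Pre_part1 lines → Spec_part1 lines (part1 lines)

-- ===== LEMMAS AND PROOFS =====

theorem pvCombine_length (a v : List Int) (o : List String) :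
    (pvCombine a v o).length = min a.length (min v.length o.length) := by
  induction a generalizing v o with
  | nil => simp [pvCombine]
  | cons x xs ih =>
    cases v with
    | nil => simp [pvCombine]
    | cons y ys =>
      cases o with
      | nil => simp [pvCombine]
      | cons z zs => simp [pvCombine, ih]

theorem pvCombine_getD (a v : List Int) (o : List String) (k : Nat)
    (ha : k < a.length) (hv : k < v.length) (ho : k < o.length) :
    (pvCombine a v o).getD k 0
      = if o.getD k "" = "+" then a.getD k 0 + v.getD k 0 else a.getD k 0 * v.getD k 0 := by
  induction a generalizing v o k with
  | nil => simp at ha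
  | cons x xs ih =>
    cases v with
    | nil => simp at hv
    | cons y ys =>
      cases o with
      | nil => simp at ho
      | cons z zs =>
        cases k with
        | zero => simp [pvCombine]
        | succ n =>
          simp only [pvCombine, List.getD_cons_succ]
          exact ih ys zs n (by simpa using ha) (by simpa using hv) (by simpa using ho)

theorem self_eq_map_range (a : List Int) :
    a = (List.range a.length).map (fun k => a.getD k 0) := by
  apply List.ext_getElem
  · simp
  · intro i h1 h2
    simp [List.getD_eq_getElem?_getD, h1]

theorem foldl_combine_eq (ops : List String) (data : List (List Int)) :
    ∀ (acc : List Int), (∀ r ∈ data, acc.length ≤ r.length) → acc.length ≤ ops.length →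
    data.foldl (fun a r => pvCombine a r ops) acc
      = (List.range acc.length).map (fun k =>
          (data.map (fun r => r.getD k 0)).foldl
            (fun x v => if ops.getD k "" = "+" then x + v else x * v)
            (acc.getD k 0)) := by
  induction data with
  | nil =>
    intro acc _ _
    simpa using self_eq_map_range acc
  | cons r rest ih =>
    intro acc hrows hops
    have hr : acc.length ≤ r.length := hrows r (by simp)
    have hlen : (pvCombine acc r ops).length = acc.length := by
      rw [pvCombine_length]; omega
    have step := ih (pvCombine acc r ops)
      (by intro r' hr'; rw [hlen]; exact hrows r' (by simp [hr']))
      (by rw [hlen]; exact hops)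
    simp only [List.foldl_cons] at *
    rw [step, hlen]
    apply List.map_congr_left
    intro k hk
    have hk' : k < acc.length := by simpa using hk
    rw [pvCombine_getD acc r ops k hk' (by omega) (by omega)]
    simp only [List.map_cons, List.foldl_cons]

theorem pyRange_zero_cast (n : Nat) :
    PySem.List.pyRange 0 (n : Int) 1 = (List.range n).map (fun k : Nat => (k : Int)) := by
  rw [PySem.List.pyRange_one]
  simp

theorem pv_key (ops : List String) (data : List (List Int))
    (hops : ((data.map List.length).min?).getD 0 ≤ ops.length) :
    (PySem.List.pyRange 0 ((pyZipStar data).length : Int) 1).foldl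
      (fun s i => if (PySem.List.pyGet? ops i).getD "" = "+" then
          s + pvReduceAdd ((PySem.List.pyGet? (pyZipStar data) i).getD [])
        else s + pvReduceMul ((PySem.List.pyGet? (pyZipStar data) i).getD [])) 0
    = (data.foldl (fun acc row => pvCombine acc row ops)
        ((PySem.List.slice ops none (some ((((data.map List.length).min?).getD 0 : Nat) : Int))).map
          (fun op => if op = "+" then (0:Int) else 1))).sum := by
  set n : Nat := ((data.map List.length).min?).getD 0 with hn
  -- n is the minimum row length; every row has at least n elements
  have hmem : ∀ rr ∈ data, n ≤ rr.length := by
    intro rr hrr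
    rcases hmin : (data.map List.length).min? with _ | m
    · rw [List.min?_eq_none_iff, List.map_eq_nil_iff] at hmin
      subst hmin; simp at hrr
    · have h2 := (List.min?_eq_some_iff.mp hmin).2 rr.length (List.mem_map_of_mem hrr)
      have : n = m := by rw [hn, hmin]; rfl
      omega
  have hpivlen : (pyZipStar data).length = n := by simp [pyZipStar, hn]
  -- A side: fold over range n, then turn into the sum of the per-column terms
  have hshape : (fun (s i : Int) =>
      if (PySem.List.pyGet? ops i).getD "" = "+" then
        s + pvReduceAdd ((PySem.List.pyGet? (pyZipStar data) i).getD [])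
      else s + pvReduceMul ((PySem.List.pyGet? (pyZipStar data) i).getD []))
    = fun s i => s + (if (PySem.List.pyGet? ops i).getD "" = "+" then
        pvReduceAdd ((PySem.List.pyGet? (pyZipStar data) i).getD [])
      else pvReduceMul ((PySem.List.pyGet? (pyZipStar data) i).getD [])) := by
    funext s i; split <;> rfl
  rw [hpivlen, hshape, PySem.List.foldl_add, zero_add, pyRange_zero_cast, List.map_map]
  -- B side
  rw [PySem.List.slice_to_natCast]
  set init : List Int := (ops.take n).map (fun op => if op = "+" then (0:Int) else 1)
    with hinit
  have hinitlen : init.length = n := by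
    simp [hinit, List.length_take]; omega
  rw [foldl_combine_eq ops data init
    (by intro rr hrr; rw [hinitlen]; exact hmem rr hrr)
    (by rw [hinitlen]; exact hops), hinitlen]
  congr 1
  apply List.map_congr_left
  intro k hk
  have hk' : k < n := by simpa using hk
  simp only [Function.comp_apply, PySem.List.pyGet?_natCast]
  have hkops : k < ops.length := lt_of_lt_of_le hk' hops
  have hpivk : ((pyZipStar data)[k]?).getD [] = data.map (fun rr => rr.getD k 0) := by
    have hkn : k < ((data.map List.length).min?).getD 0 := by rw [← hn]; exact hk'
    simp [pyZipStar, hkn, List.getD_eq_getElem?_getD]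
  have hinitk : init.getD k 0 = if ops.getD k "" = "+" then (0:Int) else 1 := by
    simp [hinit, List.getD_eq_getElem?_getD,
      List.getElem?_eq_getElem (l := ops) hkops, hk']
  rw [hpivk, hinitk]
  rcases data with _ | ⟨r, rest⟩
  · rw [hn] at hk'; simp at hk'
  · simp only [List.map_cons, List.foldl_cons]
    by_cases hop : ops.getD k "" = "+"
    all_goals rw [List.getD_eq_getElem?_getD] at hop
    · simp [hop, pvReduceAdd, List.getD_eq_getElem?_getD]
    · simp [hop, pvReduceMul, List.getD_eq_getElem?_getD]

-- ===== VERDICT (by name: the statement is the Claim_ definition above) =====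
theorem part1_spec : Claim_equal_part1 := by
  unfold Claim_equal_part1
  intro lines _ hpre
  obtain ⟨hne, -, hops⟩ := hpre
  unfold Spec_part1 part1 part1_alt
  dsimp only
  rw [PySem.List.pyGet?_neg_one, PySem.List.slice_to_neg_one]
  have hlen_eq : (lines.dropLast.map pvRow).map List.length
      = lines.dropLast.map (fun l => (PySem.Str.split₀ l).length) := by
    rw [List.map_map]
    apply List.map_congr_left
    intro l _
    simp [pvRow]
  exact pv_key (PySem.Str.split₀ (lines.getLast?.getD "")) (lines.dropLast.map pvRow)
    (by rw [hlen_eq]; exact hops)
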